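-- pv_equiv track=rewrite | github.com/aeon0/d4lf | src/tts.py | find_item_start
-- ===== SOURCE A (Python) =====
-- def has_more_than_consecutive_capitals(s, n=5):
--     capital_count = 0
--     for char in s:
--         if char.isupper():
--             capital_count += 1
--             if capital_count > n:
--                 return True
--         else:
--             capital_count = 0
--     return False
--
-- def find_item_start(strings):
--     item_starts = ["Compass", "Nightmare Sigil", "Tribute of"]
--     for index in range(len(strings) - 1, -1, -1):
--         if any(word in strings[index] for word in item_starts):
--             return index
--     for index in range(len(strings) - 1, -1, -1):
--         if has_more_than_consecutive_capitals(strings[index]):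
--             return index
--     return -1
-- ===== SOURCE B (Python) =====
-- def has_more_than_consecutive_capitals(s, n=5):
--     capital_count = 0
--     for char in s:
--         if char.isupper():
--             capital_count += 1
--             if capital_count > n:
--                 return True
--         else:
--             capital_count = 0
--     return False
--
-- def find_item_start(strings):
--     item_starts = ["Compass", "Nightmare Sigil", "Tribute of"]
--     cap = None
--     for index in range(len(strings) - 1, -1, -1):
--         s = strings[index]
--         if any(word in s for word in item_starts):
--             return index
--         if cap is None and has_more_than_consecutive_capitals(s):
--             cap = index
--     return cap if cap is not None else -1
-- ===== Notes on version B (the rewrite author's own statement) =====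
-- stated objective: alternative
-- what changed: The two backward scans (markers first, then capital runs) are fused into a single backward pass that returns immediately on a marker hit and otherwise remembers the first (i.e. last-index) capital-run index in an accumulator used only after the loop.
import Mathlib
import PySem

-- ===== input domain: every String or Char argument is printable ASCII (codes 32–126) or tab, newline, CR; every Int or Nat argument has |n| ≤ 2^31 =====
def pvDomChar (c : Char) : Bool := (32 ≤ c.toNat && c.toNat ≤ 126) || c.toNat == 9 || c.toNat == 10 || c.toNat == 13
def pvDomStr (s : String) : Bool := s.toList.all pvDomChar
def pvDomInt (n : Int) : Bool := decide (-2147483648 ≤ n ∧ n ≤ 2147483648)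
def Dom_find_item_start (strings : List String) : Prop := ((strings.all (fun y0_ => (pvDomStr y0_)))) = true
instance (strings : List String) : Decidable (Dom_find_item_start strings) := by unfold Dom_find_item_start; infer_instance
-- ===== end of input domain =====

-- B fuses A's two backward scans into one backward pass with an accumulator (alternative decomposition, same cost).

-- ===== PORT A =====
-- helper has_more_than_consecutive_capitals: loop over chars with a running capital count and early return
def pvHasMore : List Char → Int → Int → Bool
  | [], _, _ => false
  | c :: rest, n, cnt =>
      if PySem.Chars.isupper c then
        (if cnt + 1 > n then true else pvHasMore rest n (cnt + 1))
      else pvHasMore rest n 0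

def pvMarkers : List String := ["Compass", "Nightmare Sigil", "Tribute of"]

-- predicate of A's first loop: any(word in strings[index] for word in item_starts)
def pvHit (strings : List String) (i : Int) : Bool :=
  pvMarkers.any (fun w => PySem.Str.isIn w (PySem.List.pyGetD strings i ""))

-- predicate of A's second loop: has_more_than_consecutive_capitals(strings[index])
def pvCap (strings : List String) (i : Int) : Bool :=
  pvHasMore (PySem.List.pyGetD strings i "").toList 5 0

-- 'for index in idxs: if p(index): return index' with early return
def pvFindLoop (p : Int → Bool) : List Int → Option Int
  | [] => none
  | i :: rest => if p i then some i else pvFindLoop p rest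

def find_item_start (strings : List String) : Int :=
  let idxs := PySem.List.pyRange ((strings.length : Int) - 1) (-1) (-1)
  match pvFindLoop (pvHit strings) idxs with
  | some i => i
  | none =>
    match pvFindLoop (pvCap strings) idxs with
    | some i => i
    | none => -1

-- ===== PORT B =====
-- single backward pass: return on a marker hit; otherwise remember the first capital-run index in cap
def pvLoopB (p q : Int → Bool) : List Int → Option Int → Int
  | [], cap => cap.getD (-1)
  | i :: rest, cap =>
      if p i then i
      else pvLoopB p q rest (if cap.isNone && q i then some i else cap)

def find_item_start_alt (strings : List String) : Int :=
  pvLoopB (pvHit strings) (pvCap strings)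
    (PySem.List.pyRange ((strings.length : Int) - 1) (-1) (-1)) none

-- ===== PRECONDITION & SPEC =====
def Spec_find_item_start (strings : List String) (out : Int) : Prop := out = find_item_start_alt strings
instance (strings : List String) (out : Int) : Decidable (Spec_find_item_start strings out) := by unfold Spec_find_item_start; infer_instance

-- ===== CLAIM (what is proved, stated in full; the proofs are below) =====
def Claim_equal_find_item_start : Prop := ∀ (strings : List String), Dom_find_item_start strings → Spec_find_item_start strings (find_item_start strings)

-- ===== LEMMAS AND PROOFS =====

-- the fused pass equals: first loop's hit, else the stored cap, else the second loop's hit, else -1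
theorem pvLoopB_eq (p q : Int → Bool) (l : List Int) (cap : Option Int) :
    pvLoopB p q l cap =
      match pvFindLoop p l with
      | some i => i
      | none =>
        match cap with
        | some c => c
        | none => (pvFindLoop q l).getD (-1) := by
  induction l generalizing cap with
  | nil => cases cap <;> simp [pvLoopB, pvFindLoop]
  | cons i rest ih =>
    by_cases hp : p i
    · simp [pvLoopB, pvFindLoop, hp]
    · cases cap with
      | some c =>
        simp [pvLoopB, pvFindLoop, hp, ih]
      | none =>
        by_cases hq : q i <;> simp [pvLoopB, pvFindLoop, hp, hq, ih]

-- ===== VERDICT (by name: the statement is the Claim_ definition above) =====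
theorem find_item_start_spec : Claim_equal_find_item_start := by
  intro strings _
  unfold Spec_find_item_start find_item_start find_item_start_alt
  rw [pvLoopB_eq]
  cases hp : pvFindLoop (pvHit strings) (PySem.List.pyRange ((strings.length : Int) - 1) (-1) (-1)) <;>
    cases hq : pvFindLoop (pvCap strings) (PySem.List.pyRange ((strings.length : Int) - 1) (-1) (-1)) <;>
    simp [hp, hq]
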